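-- pv_equiv track=rewrite | github.com/zhangningboo/code | 牛客/2022_携程/game_str_build.py | generate_string_with_you
-- ===== SOURCE A (Python) =====
-- def generate_string_with_you(n, k):
--     if n < 3 * k or n > 3 * k + 2:
--         return "Impossible"
--
--     remaining_you = k
--     remaining_o = 1
--     remaining_u = 1
--     result = ""
--
--     for i in range(n):
--         if remaining_you > 0:
--             result += "y"
--             remaining_you -= 1
--         elif remaining_o > 0:
--             result += "o"
--             remaining_o -= 1
--         else:
--             result += "u"
--             remaining_u -= 1
--
--     return result
-- ===== SOURCE B (Python) =====
-- def generate_string_with_you(n, k):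
--     if n < 3 * k or n > 3 * k + 2:
--         return "Impossible"
--     return ("y" * k + "o" + "u" * (n - k - 1))[:n]
-- ===== Notes on version B (the rewrite author's own statement) =====
-- stated objective: simpler
-- what changed: Replaces the character-by-character counter loop with a single closed-form expression 'y'*k + 'o' + 'u'*(n-k-1) capped to length n by slicing.
import Mathlib
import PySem

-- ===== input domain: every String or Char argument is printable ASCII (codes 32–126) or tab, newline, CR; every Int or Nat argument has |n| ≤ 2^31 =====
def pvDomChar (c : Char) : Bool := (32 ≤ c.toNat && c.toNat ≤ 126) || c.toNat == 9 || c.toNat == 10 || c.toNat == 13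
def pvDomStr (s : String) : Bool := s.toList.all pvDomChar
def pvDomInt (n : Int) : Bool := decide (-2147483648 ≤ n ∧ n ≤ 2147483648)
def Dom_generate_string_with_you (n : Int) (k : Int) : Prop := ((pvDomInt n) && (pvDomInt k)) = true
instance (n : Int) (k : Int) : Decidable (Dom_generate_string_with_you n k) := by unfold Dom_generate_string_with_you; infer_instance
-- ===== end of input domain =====

-- B replaces A's per-character counter loop by one closed-form string capped to length n (simpler).

-- ===== PORT A =====
-- the loop body of A: one iteration over state (remaining_you, remaining_o, remaining_u, result)
def gswyStep (s : Int × Int × Int × String) : Int × Int × Int × String :=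
  if s.1 > 0 then (s.1 - 1, s.2.1, s.2.2.1, s.2.2.2 ++ "y")
  else if s.2.1 > 0 then (s.1, s.2.1 - 1, s.2.2.1, s.2.2.2 ++ "o")
  else (s.1, s.2.1, s.2.2.1 - 1, s.2.2.2 ++ "u")

def generate_string_with_you (n : Int) (k : Int) : String :=
  if n < 3 * k ∨ n > 3 * k + 2 then "Impossible"
  else
    let st := (PySem.List.pyRange 0 n 1).foldl (fun s _ => gswyStep s) (k, 1, 1, "")
    st.2.2.2

-- ===== PORT B =====
def generate_string_with_you_alt (n : Int) (k : Int) : String :=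
  if n < 3 * k ∨ n > 3 * k + 2 then "Impossible"
  else
    -- ("y"*k + "o" + "u"*(n-k-1))[:n] ; Python's negative repetition count gives "", hence the toNat clamp
    String.ofList (PySem.List.slice
      (List.replicate k.toNat 'y' ++ 'o' :: List.replicate (n - k - 1).toNat 'u')
      none (some n))

-- ===== PRECONDITION & SPEC =====
def Spec_generate_string_with_you (n : Int) (k : Int) (out : String) : Prop := out = generate_string_with_you_alt n k
instance (n : Int) (k : Int) (out : String) : Decidable (Spec_generate_string_with_you n k out) := by unfold Spec_generate_string_with_you; infer_instance

-- ===== CLAIM (what is proved, stated in full; the proofs are below) =====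
def Claim_equal_generate_string_with_you : Prop := ∀ (n : Int) (k : Int), Dom_generate_string_with_you n k → Spec_generate_string_with_you n k (generate_string_with_you n k)

-- ===== LEMMAS AND PROOFS =====

theorem gswy_foldl_const (l : List Int) (s : Int × Int × Int × String) :
    l.foldl (fun s _ => gswyStep s) s = gswyStep^[l.length] s := by
  induction l generalizing s with
  | nil => rfl
  | cons x xs ih => simp [List.foldl, ih, Function.iterate_succ_apply]

theorem gswy_push (acc : List Char) (c : Char) (lit : String) (hl : lit = String.ofList [c]) :
    String.ofList acc ++ lit = String.ofList (acc ++ [c]) := by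
  rw [hl, ← String.ofList_append]

theorem gswy_step_y (ry ro ru : Int) (res : String) (h : ry > 0) :
    gswyStep (ry, ro, ru, res) = (ry - 1, ro, ru, res ++ "y") := by
  simp only [gswyStep]
  rw [if_pos h]

theorem gswy_step_o (ry ro ru : Int) (res : String) (h1 : ¬ ry > 0) (h2 : ro > 0) :
    gswyStep (ry, ro, ru, res) = (ry, ro - 1, ru, res ++ "o") := by
  simp only [gswyStep]
  rw [if_neg h1, if_pos h2]

theorem gswy_step_u (ry ro ru : Int) (res : String) (h1 : ¬ ry > 0) (h2 : ¬ ro > 0) :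
    gswyStep (ry, ro, ru, res) = (ry, ro, ru - 1, res ++ "u") := by
  simp only [gswyStep]
  rw [if_neg h1, if_neg h2]

theorem gswy_yphase (m : Nat) (ro ru : Int) (acc : List Char) :
    gswyStep^[m] ((m : Int), ro, ru, String.ofList acc)
      = (0, ro, ru, String.ofList (acc ++ List.replicate m 'y')) := by
  induction m generalizing acc with
  | zero => simp
  | succ m ih =>
      rw [Function.iterate_succ_apply]
      have hstep : gswyStep ((((m : Nat) + 1 : Nat) : Int), ro, ru, String.ofList acc)
          = ((m : Int), ro, ru, String.ofList (acc ++ ['y'])) := by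
        rw [gswy_step_y _ _ _ _ (by omega), gswy_push acc 'y' "y" rfl]
        simp
      rw [hstep, ih]
      have hlist : acc ++ ['y'] ++ List.replicate m 'y' = acc ++ List.replicate (m + 1) 'y' := by
        simp [List.replicate_succ, List.append_assoc]
      rw [hlist]

theorem gswy_uphase (m : Nat) (ru : Int) (acc : List Char) :
    gswyStep^[m] (0, 0, ru, String.ofList acc)
      = (0, 0, ru - m, String.ofList (acc ++ List.replicate m 'u')) := by
  induction m generalizing ru acc with
  | zero => simp
  | succ m ih =>
      rw [Function.iterate_succ_apply]
      have hstep : gswyStep (0, 0, ru, String.ofList acc)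
          = (0, 0, ru - 1, String.ofList (acc ++ ['u'])) := by
        rw [gswy_step_u _ _ _ _ (by omega) (by omega), gswy_push acc 'u' "u" rfl]
      rw [hstep, ih]
      have harith : ru - 1 - (m : Int) = ru - ((m + 1 : Nat) : Int) := by push_cast; ring
      have hlist : acc ++ ['u'] ++ List.replicate m 'u' = acc ++ List.replicate (m + 1) 'u' := by
        simp [List.replicate_succ, List.append_assoc]
      rw [harith, hlist]

-- full loop for k ≥ 0: n = (1 + r) + k iterations yield y^k o u^r
theorem gswy_loop (k r : Nat) (ru : Int) :
    gswyStep^[(1 + r) + k] ((k : Int), 1, ru, String.ofList [])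
      = (0, 0, ru - r, String.ofList (List.replicate k 'y' ++ 'o' :: List.replicate r 'u')) := by
  rw [Function.iterate_add_apply, gswy_yphase]
  rw [(by omega : 1 + r = r + 1), Function.iterate_succ_apply]
  have hstep : gswyStep (0, 1, ru, String.ofList ([] ++ List.replicate k 'y'))
      = (0, 0, ru, String.ofList (List.replicate k 'y' ++ ['o'])) := by
    rw [gswy_step_o _ _ _ _ (by omega) (by omega), gswy_push _ 'o' "o" rfl]
    simp
  rw [hstep, gswy_uphase]
  simp [List.append_assoc]

-- ===== VERDICT (by name: the statement is the Claim_ definition above) =====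
theorem generate_string_with_you_spec : Claim_equal_generate_string_with_you := by
  intro n k _
  unfold Spec_generate_string_with_you generate_string_with_you generate_string_with_you_alt
  by_cases hguard : n < 3 * k ∨ n > 3 * k + 2
  · simp [hguard]
  · simp only [hguard, if_false]
    have hk : 3 * k ≤ n ∧ n ≤ 3 * k + 2 := by omega
    by_cases hkneg : k < 0
    · -- n < 0 : loop runs zero times; B's slice to a negative bound is empty
      have hn : n < 0 := by omega
      rw [PySem.List.pyRange_one_eq_nil (by omega)]
      have hsimp : (List.replicate k.toNat 'y' ++ 'o' :: List.replicate (n - k - 1).toNat 'u') = ['o'] := by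
        have h1 : k.toNat = 0 := by omega
        have h2 : (n - k - 1).toNat = 0 := by omega
        simp [h1, h2]
      rw [hsimp]
      have hs : PySem.List.slice (['o'] : List Char) none (some n) = ([] : List Char) := by
        rw [(by omega : n = -(((-n).toNat : Nat) : Int)),
            PySem.List.slice_to_neg_natCast (['o'] : List Char) (-n).toNat (by omega)]
        have h0 : (['o'] : List Char).length - (-n).toNat = 0 := by simp; omega
        rw [h0, List.take_zero]
      rw [hs]
      rfl
    · -- k ≥ 0, hence 0 ≤ n
      have hn0 : 0 ≤ n := by omega
      obtain ⟨K, hK⟩ : ∃ K : Nat, k = (K : Int) := ⟨k.toNat, by omega⟩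
      obtain ⟨N, hN⟩ : ∃ N : Nat, n = (N : Int) := ⟨n.toNat, by omega⟩
      subst hK hN
      rw [gswy_foldl_const, PySem.List.length_pyRange_one]
      by_cases hk0 : K = 0
      · subst hk0
        have h2 : N ≤ 2 := by omega
        interval_cases N <;> decide
      · have hsplit : ((N : Int) - 0).toNat = (1 + ((N : Int) - K - 1).toNat) + K := by omega
        rw [hsplit, (by simp : ((K : Int) : Int) = ((K : Nat) : Int)), gswy_loop]
        rw [PySem.List.slice_to_natCast]
        have hlen : (List.replicate ((K : Int)).toNat 'y' ++ 'o' :: List.replicate ((N : Int) - K - 1).toNat 'u').length = N := by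
          simp; omega
        simp only [Int.toNat_natCast] at hlen ⊢
        rw [List.take_of_length_le (le_of_eq hlen)]
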